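-- pv_equiv track=rewrite | github.com/relomy/dk_results | src/dk_results/cli/update_contests.py | _canonical_vips
-- ===== SOURCE A (Python) =====
-- from typing import Any
--
-- def _vip_key(name: Any) -> str:
--     if not isinstance(name, str):
--         return ""
--     return name.strip().lower()
--
-- def _canonical_vips(vips_cashed: list[str]) -> list[str]:
--     unique: dict[str, str] = {}
--     for name in vips_cashed:
--         cleaned = str(name).strip()
--         key = _vip_key(cleaned)
--         if not key or key in unique:
--             continue
--         unique[key] = cleaned
--     return sorted(unique.values(), key=lambda vip: vip.lower())
-- ===== SOURCE B (Python) =====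
-- def _canonical_vips(vips_cashed: list[str]) -> list[str]:
--     survivors = [c for c in (str(name).strip() for name in vips_cashed) if c]
--     survivors.sort(key=str.lower)
--     result: list[str] = []
--     prev = None
--     for vip in survivors:
--         key = vip.lower()
--         if key != prev:
--             result.append(vip)
--             prev = key
--     return result
-- ===== Notes on version B (the rewrite author's own statement) =====
-- stated objective: alternative
-- what changed: Replaces A's first-occurrence dict keyed by lowercased name (then sorting its values) with a dict-free pipeline: clean, filter empties, stable-sort by lower(), and deduplicate adjacent equal-key runs in one linear scan (stability makes the kept element the first occurrence).
import Mathlib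
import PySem

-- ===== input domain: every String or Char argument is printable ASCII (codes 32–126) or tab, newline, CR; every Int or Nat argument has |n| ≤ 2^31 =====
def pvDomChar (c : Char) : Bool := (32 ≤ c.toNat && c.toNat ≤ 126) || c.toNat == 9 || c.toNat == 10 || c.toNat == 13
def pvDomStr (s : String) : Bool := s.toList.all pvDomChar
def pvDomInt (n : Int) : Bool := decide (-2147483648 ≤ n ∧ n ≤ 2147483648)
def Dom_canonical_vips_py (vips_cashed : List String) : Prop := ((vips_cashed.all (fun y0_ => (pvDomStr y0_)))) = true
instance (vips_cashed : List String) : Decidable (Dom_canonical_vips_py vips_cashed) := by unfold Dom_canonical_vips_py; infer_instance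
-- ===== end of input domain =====

-- B dedups without a dict: clean, drop empties, stable-sort by lower(), then keep the first item of
-- each adjacent equal-lowercase run in one linear scan (same output, no dict).

-- ===== PORT A =====
-- _vip_key: the isinstance branch never fires (name is always a str here)
def vip_key (name : String) : String := PySem.Str.lower (PySem.Str.strip name)

def canonical_vips_py (vips_cashed : List String) : List String :=
  -- str(name) is the identity on str
  let unique : PySem.Dict String String :=
    vips_cashed.foldl (fun u name =>
      let cleaned := PySem.Str.strip name
      let key := vip_key cleaned
      if key = "" ∨ u.contains key then u else u.insert key cleaned) PySem.Dict.empty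
  PySem.List.sorted unique.values (fun vip => PySem.Str.lower vip) false

-- ===== PORT B =====
def canonical_vips_py_alt (vips_cashed : List String) : List String :=
  let survivors := (vips_cashed.map (fun name => PySem.Str.strip name)).filter (fun c => !(c == ""))
  let ss := PySem.List.sorted survivors (fun v => PySem.Str.lower v) false
  (ss.foldl (fun (st : List String × Option String) vip =>
      let key := PySem.Str.lower vip
      if some key ≠ st.2 then (st.1 ++ [vip], some key) else st) ([], none)).1

-- ===== PRECONDITION & SPEC =====
def Spec_canonical_vips_py (vips_cashed : List String) (out : List String) : Prop := out = canonical_vips_py_alt vips_cashed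
instance (vips_cashed : List String) (out : List String) : Decidable (Spec_canonical_vips_py vips_cashed out) := by unfold Spec_canonical_vips_py; infer_instance

-- ===== CLAIM (what is proved, stated in full; the proofs are below) =====
def Claim_equal_canonical_vips_py : Prop := ∀ (vips_cashed : List String), Dom_canonical_vips_py vips_cashed → Spec_canonical_vips_py vips_cashed (canonical_vips_py vips_cashed)

-- ===== LEMMAS AND PROOFS =====

-- abbreviation used throughout the proofs
def klow (v : String) : String := PySem.Str.lower v

def bef (a b : String) : Bool := decide (klow a < klow b)

theorem insertBy_nil (x : String) : PySem.List.insertBy bef x [] = [x] := rfl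

theorem insertBy_cons_pos {x y : String} (t : List String) (h : klow x < klow y) :
    PySem.List.insertBy bef x (y :: t) = x :: y :: t := by
  simp [PySem.List.insertBy, bef, h]

theorem insertBy_cons_neg {x y : String} (t : List String) (h : ¬ klow x < klow y) :
    PySem.List.insertBy bef x (y :: t) = y :: PySem.List.insertBy bef x t := by
  simp [PySem.List.insertBy, bef, h]

-- ---------- strip is idempotent ----------

theorem dropWhile_of_dropWhile_append (p : Char → Bool) :
    ∀ (l₁ l₂ : List Char), List.dropWhile p (l₁ ++ l₂) = l₁ ++ l₂ → List.dropWhile p l₁ = l₁ := by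
  intro l₁ l₂ h
  cases l₁ with
  | nil => simp
  | cons a t =>
    rw [List.cons_append, List.dropWhile_cons] at h
    by_cases hp : p a = true
    · exfalso
      rw [if_pos hp] at h
      have := List.length_dropWhile_le p (t ++ l₂)
      rw [h] at this
      simp at this
    · simp [List.dropWhile_cons, hp]

theorem dropWhile_idem (p : Char → Bool) (l : List Char) :
    List.dropWhile p (List.dropWhile p l) = List.dropWhile p l := by
  induction l with
  | nil => simp
  | cons a t ih =>
    rw [List.dropWhile_cons]
    by_cases hp : p a = true
    · simpa [hp] using ih
    · simp [List.dropWhile_cons, hp]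

theorem chars_strip_idem (l : List Char) :
    PySem.Chars.strip (PySem.Chars.strip l) = PySem.Chars.strip l := by
  unfold PySem.Chars.strip PySem.Chars.rstrip PySem.Chars.lstrip
  set p := PySem.Chars.isspace
  set t := List.dropWhile p l with ht
  have h1 : List.dropWhile p t = t := by rw [ht]; exact dropWhile_idem p l
  have hsplit : t = (List.dropWhile p t.reverse).reverse ++ (List.takeWhile p t.reverse).reverse := by
    have h0 := List.takeWhile_append_dropWhile (p := p) (l := t.reverse)
    calc t = t.reverse.reverse := by simp
    _ = (List.takeWhile p t.reverse ++ List.dropWhile p t.reverse).reverse := by rw [h0]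
    _ = _ := by rw [List.reverse_append]
  have h2 : List.dropWhile p (List.dropWhile p t.reverse).reverse = (List.dropWhile p t.reverse).reverse := by
    apply dropWhile_of_dropWhile_append p _ (List.takeWhile p t.reverse).reverse
    rw [← hsplit]; exact h1
  rw [h2, List.reverse_reverse, dropWhile_idem]

theorem str_strip_idem (s : String) :
    PySem.Str.strip (PySem.Str.strip s) = PySem.Str.strip s := by
  show String.ofList (PySem.Chars.strip (PySem.Str.strip s).toList) = _
  rw [PySem.Str.toList_strip, chars_strip_idem]
  rfl

theorem klow_eq_empty_iff (s : String) : klow s = "" ↔ s = "" := by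
  rw [← String.toList_inj, ← String.toList_inj]
  show (PySem.Str.lower s).toList = _ ↔ _
  rw [PySem.Str.toList_lower]
  unfold PySem.Chars.lower
  simp

-- ---------- first-occurrence dedup (characterises A's dict values) ----------

def dfirst (seen : List String) : List String → List String
  | [] => []
  | x :: t => if klow x ∈ seen then dfirst seen t else x :: dfirst (klow x :: seen) t

theorem dfirst_congr : ∀ (l : List String) (s₁ s₂ : List String),
    (∀ a, a ∈ s₁ ↔ a ∈ s₂) → dfirst s₁ l = dfirst s₂ l := by
  intro l
  induction l with
  | nil => intro _ _ _; rfl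
  | cons x t ih =>
    intro s₁ s₂ h
    simp only [dfirst]
    by_cases hx : klow x ∈ s₁
    · rw [if_pos hx, if_pos ((h _).mp hx), ih _ _ h]
    · rw [if_neg hx, if_neg (fun hc => hx ((h _).mpr hc)), ih (klow x :: s₁) (klow x :: s₂) ?_]
      intro a; simp [h a]

theorem dfirst_append_single : ∀ (l : List String) (seen : List String) (x : String),
    dfirst seen (l ++ [x]) =
      dfirst seen l ++ (if klow x ∈ seen ∨ klow x ∈ l.map klow then [] else [x]) := by
  intro l
  induction l with
  | nil =>
    intro seen x
    simp [dfirst]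
  | cons a t ih =>
    intro seen x
    simp only [List.cons_append, dfirst]
    by_cases ha : klow a ∈ seen
    · rw [if_pos ha, if_pos ha, ih]
      have hiff : (klow x ∈ seen ∨ klow x ∈ List.map klow t)
          ↔ (klow x ∈ seen ∨ klow x ∈ List.map klow (a :: t)) := by
        simp only [List.map_cons, List.mem_cons]
        constructor
        · rintro (h | h)
          · exact Or.inl h
          · exact Or.inr (Or.inr h)
        · rintro (h | h | h)
          · exact Or.inl h
          · exact Or.inl (h ▸ ha)
          · exact Or.inr h
      rw [if_congr hiff rfl rfl]
    · rw [if_neg ha, if_neg ha, ih, List.cons_append]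
      have hiff : (klow x ∈ klow a :: seen ∨ klow x ∈ List.map klow t)
          ↔ (klow x ∈ seen ∨ klow x ∈ List.map klow (a :: t)) := by
        simp only [List.map_cons, List.mem_cons]
        tauto
      rw [if_congr hiff rfl rfl]

-- ---------- A's fold builds exactly (first survivor per key) ----------

def surv (l : List String) : List String :=
  (l.map (fun name => PySem.Str.strip name)).filter (fun c => !(c == ""))

theorem foldA_values : ∀ (l : List String) (acc : List String),
    (l.foldl (fun u name =>
      let cleaned := PySem.Str.strip name
      let key := vip_key cleaned
      if key = "" ∨ u.contains key then u else u.insert key cleaned)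
      (PySem.Dict.mk (acc.map (fun v => (klow v, v))))).values
    = acc ++ dfirst (acc.map klow) (surv l) := by
  intro l
  induction l with
  | nil =>
    intro acc
    simp [PySem.Dict.values, surv, dfirst, List.map_map, Function.comp_def]
  | cons name t ih =>
    intro acc
    have hclean : PySem.Str.strip (PySem.Str.strip name) = PySem.Str.strip name := str_strip_idem name
    have hkey : vip_key (PySem.Str.strip name) = klow (PySem.Str.strip name) := by
      unfold vip_key; rw [hclean]; rfl
    have hcont : (PySem.Dict.mk (acc.map (fun v => (klow v, v)))).contains (klow (PySem.Str.strip name))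
        = decide (klow (PySem.Str.strip name) ∈ acc.map klow) := by
      rw [PySem.Dict.contains_eq_decide_mem_keys]
      congr 1
      simp [PySem.Dict.keys, List.map_map, Function.comp_def]
    simp only [List.foldl_cons, hkey]
    by_cases hempty : PySem.Str.strip name = ""
    · rw [if_pos (Or.inl (by rw [klow_eq_empty_iff]; exact hempty))]
      rw [ih]
      congr 2
      unfold surv
      simp [hempty]
    · have hsurv : surv (name :: t) = PySem.Str.strip name :: surv t := by
        unfold surv; simp [hempty]
      by_cases hmem : klow (PySem.Str.strip name) ∈ acc.map klow
      · rw [if_pos (Or.inr (by rw [hcont]; simpa using hmem))]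
        rw [ih, hsurv]
        simp only [dfirst, if_pos hmem]
      · rw [if_neg ?_, show (PySem.Dict.mk (acc.map (fun v => (klow v, v)))).insert
              (klow (PySem.Str.strip name)) (PySem.Str.strip name)
            = PySem.Dict.mk ((acc ++ [PySem.Str.strip name]).map (fun v => (klow v, v))) from ?_]
        · rw [ih (acc ++ [PySem.Str.strip name]), hsurv]
          simp only [dfirst, List.map_append, List.append_assoc]
          rw [if_neg hmem, List.singleton_append]
          congr 2
          rw [dfirst_congr (surv t) _ (klow (PySem.Str.strip name) :: acc.map klow) ?_]
          intro a; simp [or_comm]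
        · unfold PySem.Dict.insert
          rw [hcont, if_neg (by simpa using hmem)]
          simp
        · push_neg
          refine ⟨?_, ?_⟩
          · intro hc; exact hempty (by rwa [klow_eq_empty_iff] at hc)
          · rw [hcont]; simpa using hmem

-- ---------- B's scan as a recursion ----------

def dAdj (prev : Option String) : List String → List String
  | [] => []
  | x :: t => if some (klow x) = prev then dAdj prev t else x :: dAdj (some (klow x)) t

theorem dAdj_cons (prev : Option String) (x : String) (t : List String) :
    dAdj prev (x :: t) = if some (klow x) = prev then dAdj prev t else x :: dAdj (some (klow x)) t := rfl

theorem foldB_eq_dAdj : ∀ (l : List String) (out : List String) (prev : Option String),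
    (l.foldl (fun (st : List String × Option String) vip =>
      let key := PySem.Str.lower vip
      if some key ≠ st.2 then (st.1 ++ [vip], some key) else st) (out, prev)).1
    = out ++ dAdj prev l := by
  intro l
  induction l with
  | nil => intro out prev; simp [dAdj]
  | cons x t ih =>
    intro out prev
    simp only [List.foldl_cons, dAdj_cons]
    by_cases h : some (klow x) = prev
    · rw [if_neg (show ¬ some (PySem.Str.lower x) ≠ prev by simpa [klow] using h), if_pos h, ih]
    · rw [if_pos (show some (PySem.Str.lower x) ≠ prev by simpa [klow] using h), if_neg h, ih]
      simp [klow]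

-- ---------- interaction of dAdj with stable insertion ----------

theorem dAdj_insertBy_mem (x : String) : ∀ (s : List String) (prev : Option String),
    s.Pairwise (fun a b => klow a ≤ klow b) →
    (klow x ∈ s.map klow ∨ (prev = some (klow x) ∧ ∀ z ∈ s, klow x ≤ klow z)) →
    dAdj prev (PySem.List.insertBy bef x s) = dAdj prev s := by
  intro s
  induction s with
  | nil =>
    intro prev _ h
    rcases h with h | ⟨hp, _⟩
    · simp at h
    · rw [insertBy_nil, dAdj_cons, if_pos hp.symm]
  | cons y t ih =>
    intro prev hpw h
    rw [List.pairwise_cons] at hpw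
    by_cases hlt : klow x < klow y
    · have hprev : prev = some (klow x) := by
        rcases h with h | ⟨hp, _⟩
        · exfalso
          simp only [List.map_cons, List.mem_cons] at h
          rcases h with h | h
          · rw [h] at hlt; exact lt_irrefl _ hlt
          · obtain ⟨z, hz, hzx⟩ := List.mem_map.mp h
            have hle := hpw.1 z hz
            rw [hzx] at hle
            exact absurd (lt_of_lt_of_le hlt hle) (lt_irrefl _)
        · exact hp
      rw [insertBy_cons_pos t hlt, dAdj_cons, if_pos hprev.symm]
    · rw [insertBy_cons_neg t hlt]
      have hyx : klow y ≤ klow x := le_of_not_gt hlt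
      have hnext : klow x ∈ t.map klow ∨ (some (klow y) = some (klow x) ∧ ∀ z ∈ t, klow x ≤ klow z) := by
        rcases h with h | ⟨hp, hall⟩
        · simp only [List.map_cons, List.mem_cons] at h
          rcases h with h | h
          · exact Or.inr ⟨by rw [h], fun z hz => h ▸ hpw.1 z hz⟩
          · exact Or.inl h
        · have hxly : klow x ≤ klow y := hall y List.mem_cons_self
          have heq : klow x = klow y := le_antisymm hxly hyx
          exact Or.inr ⟨by rw [heq], fun z hz => heq ▸ hpw.1 z hz⟩
      rw [dAdj_cons, dAdj_cons prev y t]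
      by_cases hy : some (klow y) = prev
      · rw [if_pos hy, if_pos hy]
        have hnext' : klow x ∈ t.map klow ∨ (prev = some (klow x) ∧ ∀ z ∈ t, klow x ≤ klow z) := by
          rcases hnext with h' | ⟨he, ha⟩
          · exact Or.inl h'
          · exact Or.inr ⟨by rw [← hy, he], ha⟩
        exact ih prev hpw.2 hnext'
      · rw [if_neg hy, if_neg hy]
        rw [ih (some (klow y)) hpw.2 hnext]

theorem dAdj_insertBy_fresh (x : String) : ∀ (s : List String) (prev : Option String),
    s.Pairwise (fun a b => klow a ≤ klow b) →
    klow x ∉ s.map klow →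
    (prev = none ∨ ∃ p, prev = some p ∧ p < klow x) →
    dAdj prev (PySem.List.insertBy bef x s) = PySem.List.insertBy bef x (dAdj prev s) := by
  intro s
  induction s with
  | nil =>
    intro prev _ _ hprev
    have hxp : ¬ some (klow x) = prev := by
      rcases hprev with h | ⟨p, hp, hplt⟩
      · rw [h]; simp
      · rw [hp]; intro hc; rw [Option.some_inj] at hc; rw [hc] at hplt; exact lt_irrefl _ hplt
    show dAdj prev (PySem.List.insertBy bef x []) = PySem.List.insertBy bef x (dAdj prev [])
    rw [insertBy_nil, show dAdj prev [] = [] from rfl, insertBy_nil, dAdj_cons, if_neg hxp]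
    rfl
  | cons y t ih =>
    intro prev hpw hfresh hprev
    rw [List.pairwise_cons] at hpw
    have hxy : klow x ≠ klow y := fun h => hfresh (by simp [h])
    have hxp : ¬ some (klow x) = prev := by
      rcases hprev with h | ⟨p, hp, hplt⟩
      · rw [h]; simp
      · rw [hp]; intro hc; rw [Option.some_inj] at hc; rw [hc] at hplt; exact lt_irrefl _ hplt
    by_cases hlt : klow x < klow y
    · have hyp : ¬ some (klow y) = prev := by
        rcases hprev with h | ⟨p, hp, hplt⟩
        · rw [h]; simp
        · rw [hp]; intro hc; rw [Option.some_inj] at hc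
          rw [← hc] at hplt
          exact absurd (lt_trans hplt hlt) (lt_irrefl _)
      rw [insertBy_cons_pos t hlt, dAdj_cons, if_neg hxp, dAdj_cons,
        if_neg (show ¬ some (klow y) = some (klow x) by simpa using hxy.symm),
        dAdj_cons prev y t, if_neg hyp, insertBy_cons_pos _ hlt]
    · have hyltx : klow y < klow x := lt_of_le_of_ne (le_of_not_gt hlt) (Ne.symm hxy)
      rw [insertBy_cons_neg t hlt, dAdj_cons, dAdj_cons prev y t]
      by_cases hy : some (klow y) = prev
      · rw [if_pos hy, if_pos hy]
        exact ih prev hpw.2 (fun hc => hfresh (by simp at hc ⊢; tauto)) hprev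
      · rw [if_neg hy, if_neg hy]
        rw [ih (some (klow y)) hpw.2 (fun hc => hfresh (by simp at hc ⊢; tauto))
          (Or.inr ⟨klow y, rfl, hyltx⟩)]
        rw [insertBy_cons_neg _ hlt]

theorem dAdj_sorted_eq_sorted_dfirst : ∀ (xs : List String),
    dAdj none (PySem.List.sorted xs klow false) = PySem.List.sorted (dfirst [] xs) klow false := by
  intro xs
  induction xs using List.reverseRecOn with
  | nil => rfl
  | append_singleton l x ih =>
    have hsortapp : ∀ (ys : List String), PySem.List.sorted (ys ++ [x]) klow false
        = PySem.List.insertBy bef x (PySem.List.sorted ys klow false) := by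
      intro ys
      rw [PySem.List.sorted_eq_foldl_insertBy, PySem.List.sorted_eq_foldl_insertBy, List.foldl_append]
      rfl
    rw [hsortapp l, dfirst_append_single]
    by_cases hmem : klow x ∈ l.map klow
    · rw [if_pos (Or.inr hmem), List.append_nil]
      rw [dAdj_insertBy_mem x _ none (PySem.List.sorted_pairwise l klow) (Or.inl ?_), ih]
      obtain ⟨z, hz, hzx⟩ := List.mem_map.mp hmem
      exact List.mem_map.mpr ⟨z, (PySem.List.mem_sorted l klow false z).mpr hz, hzx⟩
    · rw [if_neg (by simpa using hmem)]
      rw [dAdj_insertBy_fresh x _ none (PySem.List.sorted_pairwise l klow) ?_ (Or.inl rfl), ih, ← hsortapp]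
      intro hc
      obtain ⟨z, hz, hzx⟩ := List.mem_map.mp hc
      exact hmem (List.mem_map.mpr ⟨z, (PySem.List.mem_sorted l klow false z).mp hz, hzx⟩)

-- ===== VERDICT (by name: the statement is the Claim_ definition above) =====
theorem canonical_vips_py_spec : Claim_equal_canonical_vips_py := by
  intro vips _
  have hA := foldA_values vips []
  simp only [List.map_nil] at hA
  show canonical_vips_py vips = canonical_vips_py_alt vips
  simp only [canonical_vips_py, canonical_vips_py_alt]
  rw [show (PySem.Dict.empty : PySem.Dict String String) = PySem.Dict.mk [] from rfl, hA,
    foldB_eq_dAdj, List.nil_append, List.nil_append]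
  exact (dAdj_sorted_eq_sorted_dfirst (surv vips)).symm
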